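-- pv_equiv track=rewrite | github.com/kakao/OrchestrationBench | src/utils/evaluation/evaluate_workflow_as_DAG.py | _last_agent_state
-- ===== SOURCE A (Python) =====
-- from typing import Dict, List, Any, Tuple, Set, Optional
--
-- def _last_agent_state(steps: List[Dict[str, Any]]) -> Optional[Tuple[str, str]]:
--     last = None
--     for s in steps or []:
--         a = s.get('agent_id') or s.get('name')  # Handle both 'agent_id' and 'name' keys
--         st = s.get('status', 'UNK')
--         if a:
--             last = (a, st)
--     return last
-- ===== SOURCE B (Python) =====
-- from typing import Dict, List, Any, Tuple, Optional
--
-- def _last_agent_state(steps: List[Dict[str, Any]]) -> Optional[Tuple[str, str]]: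
--     for s in reversed(steps or []):
--         a = s.get('agent_id') or s.get('name')
--         if a:
--             return (a, s.get('status', 'UNK'))
--     return None
-- ===== Notes on version B (the rewrite author's own statement) =====
-- stated objective: simpler
-- what changed: Scans the steps in reverse and returns immediately at the first step with a truthy agent, instead of a forward pass that keeps overwriting a 'last' accumulator.
import Mathlib
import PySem

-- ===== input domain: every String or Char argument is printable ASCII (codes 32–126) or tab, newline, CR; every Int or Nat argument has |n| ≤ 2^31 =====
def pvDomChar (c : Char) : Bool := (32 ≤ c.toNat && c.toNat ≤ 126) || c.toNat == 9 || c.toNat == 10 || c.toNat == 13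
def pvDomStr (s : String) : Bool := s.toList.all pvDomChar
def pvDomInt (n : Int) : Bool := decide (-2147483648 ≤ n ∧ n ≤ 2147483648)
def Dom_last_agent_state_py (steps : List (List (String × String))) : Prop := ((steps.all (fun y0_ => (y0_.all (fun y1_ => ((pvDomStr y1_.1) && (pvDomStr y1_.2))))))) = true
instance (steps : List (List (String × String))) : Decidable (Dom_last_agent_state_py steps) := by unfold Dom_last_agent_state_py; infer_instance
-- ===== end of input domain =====

-- B replaces A's forward accumulate-last loop by a reverse scan with early return (objective: simpler).

-- ===== PORT A =====
-- forward loop, 'last' accumulator overwritten at each step with a truthy agent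
def last_agent_state_py (steps : List (List (String × String))) : Option (String × String) :=
  steps.foldl
    (fun last s =>
      -- a = s.get('agent_id') or s.get('name')   ('' and missing are falsy)
      let a : Option String :=
        match s.lookup "agent_id" with
        | some v => if v = "" then s.lookup "name" else some v
        | none => s.lookup "name"
      -- st = s.get('status', 'UNK')
      let st : String := (s.lookup "status").getD "UNK"
      -- if a: last = (a, st)
      match a with
      | some v => if v = "" then last else some (v, st)
      | none => last)
    none

-- ===== PORT B =====
-- for s in reversed(steps): if a truthy, return (a, st); after the loop, None
def lastB_go : List (List (String × String)) → Option (String × String)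
  | [] => none
  | s :: rest =>
    let a : Option String :=
      match s.lookup "agent_id" with
      | some v => if v = "" then s.lookup "name" else some v
      | none => s.lookup "name"
    match a with
    | some v => if v = "" then lastB_go rest else some (v, (s.lookup "status").getD "UNK")
    | none => lastB_go rest

def last_agent_state_py_alt (steps : List (List (String × String))) : Option (String × String) :=
  lastB_go steps.reverse

-- ===== PRECONDITION & SPEC =====
def Spec_last_agent_state_py (steps : List (List (String × String))) (out : Option (String × String)) : Prop := out = last_agent_state_py_alt steps
instance (steps : List (List (String × String))) (out : Option (String × String)) : Decidable (Spec_last_agent_state_py steps out) := by unfold Spec_last_agent_state_py; infer_instance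

-- ===== CLAIM (what is proved, stated in full; the proofs are below) =====
def Claim_equal_last_agent_state_py : Prop := ∀ (steps : List (List (String × String))), Dom_last_agent_state_py steps → Spec_last_agent_state_py steps (last_agent_state_py steps)

-- ===== LEMMAS AND PROOFS =====

-- A's per-step update function, named for the proofs
def pvStepA (last : Option (String × String)) (s : List (String × String)) : Option (String × String) :=
  let a : Option String :=
    match s.lookup "agent_id" with
    | some v => if v = "" then s.lookup "name" else some v
    | none => s.lookup "name"
  let st : String := (s.lookup "status").getD "UNK"
  match a with
  | some v => if v = "" then last else some (v, st)
  | none => last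

theorem lastB_go_append (l1 l2 : List (List (String × String))) :
    lastB_go (l1 ++ l2) = match lastB_go l1 with | some p => some p | none => lastB_go l2 := by
  induction l1 with
  | nil => simp [lastB_go]
  | cons s t ih =>
    simp only [List.cons_append, lastB_go, ih]
    rcases h : (match s.lookup "agent_id" with
        | some v => if v = "" then s.lookup "name" else some v
        | none => s.lookup "name" : Option String) with _ | v
    · rfl
    · by_cases hv : v = "" <;> simp [hv]

theorem foldl_eq_rev (xs : List (List (String × String))) :
    ∀ acc, xs.foldl pvStepA acc = match lastB_go xs.reverse with | some p => some p | none => acc := by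
  induction xs with
  | nil => intro acc; simp [lastB_go]
  | cons s t ih =>
    intro acc
    simp only [List.foldl_cons, List.reverse_cons, lastB_go_append, ih]
    rcases lastB_go t.reverse with _ | p
    · simp only [pvStepA, lastB_go]
      rcases h : (match s.lookup "agent_id" with
          | some v => if v = "" then s.lookup "name" else some v
          | none => s.lookup "name" : Option String) with _ | v
      · rfl
      · by_cases hv : v = "" <;> simp [hv]
    · rfl

-- ===== VERDICT (by name: the statement is the Claim_ definition above) =====
theorem last_agent_state_py_spec : Claim_equal_last_agent_state_py := by
  intro steps _
  show steps.foldl pvStepA none = last_agent_state_py_alt steps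
  rw [foldl_eq_rev]
  unfold last_agent_state_py_alt
  rcases lastB_go steps.reverse with _ | p <;> rfl
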